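-- pv_equiv track=rewrite | github.com/hemal9102/ChessAI-Glasses | video_fen_conversion.py | validate_chess_position
-- ===== SOURCE A (Python) =====
-- def validate_chess_position(chess_pieces):
--     piece_count = {'white-king': 0, 'black-king': 0, 'white-pawn': 0, 'black-pawn': 0, 'white': 0, 'black': 0}
--     for sq, name in chess_pieces:
--         if name == 'white-king':
--             piece_count['white-king'] += 1
--             piece_count['white'] += 1
--         elif name == 'black-king':
--             piece_count['black-king'] += 1
--             piece_count['black'] += 1
--         elif name == 'white-pawn':
--             piece_count['white-pawn'] += 1
--             piece_count['white'] += 1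
--             if sq[1] in ('1', '8'):
--                 return False
--         elif name == 'black-pawn':
--             piece_count['black-pawn'] += 1
--             piece_count['black'] += 1
--             if sq[1] in ('1', '8'):
--                 return False
--         elif name.startswith('white'):
--             piece_count['white'] += 1
--         elif name.startswith('black'):
--             piece_count['black'] += 1
--     if piece_count['white-king'] != 1 or piece_count['black-king'] != 1:
--         return False
--     if piece_count['white-pawn'] > 8 or piece_count['black-pawn'] > 8:
--         return False
--     if piece_count['white'] > 16 or piece_count['black'] > 16:
--         return False
--     return True
-- ===== SOURCE B (Python) =====
-- def validate_chess_position(chess_pieces):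
--     # lazy generator: touches sq[1] only for pawns, in order (same raise behaviour as A)
--     if any(sq[1] in ('1', '8')
--            for sq, name in chess_pieces
--            if name in ('white-pawn', 'black-pawn')):
--         return False
--     names = [name for _, name in chess_pieces]
--     return (names.count('white-king') == 1
--             and names.count('black-king') == 1
--             and names.count('white-pawn') <= 8
--             and names.count('black-pawn') <= 8
--             and sum(1 for n in names if n.startswith('white')) <= 16
--             and sum(1 for n in names if n.startswith('black')) <= 16)
-- ===== Notes on version B (the rewrite author's own statement) =====
-- stated objective: simpler
-- what changed: Replaces the single interleaved six-counter loop with early returns by a short-circuiting pawn-placement check followed by independent count/countP aggregation passes over the names.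
import Mathlib
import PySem

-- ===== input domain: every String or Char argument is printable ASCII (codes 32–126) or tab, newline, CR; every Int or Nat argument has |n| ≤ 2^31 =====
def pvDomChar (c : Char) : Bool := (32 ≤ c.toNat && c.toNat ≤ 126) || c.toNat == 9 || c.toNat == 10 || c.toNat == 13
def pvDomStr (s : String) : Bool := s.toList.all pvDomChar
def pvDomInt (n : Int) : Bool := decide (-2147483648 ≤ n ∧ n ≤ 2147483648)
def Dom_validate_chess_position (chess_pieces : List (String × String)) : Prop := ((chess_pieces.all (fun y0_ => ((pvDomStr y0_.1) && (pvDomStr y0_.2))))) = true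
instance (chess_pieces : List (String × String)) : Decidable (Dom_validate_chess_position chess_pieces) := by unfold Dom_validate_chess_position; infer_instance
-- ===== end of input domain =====

-- B replaces A's single interleaved six-counter loop by a short-circuit pawn check plus
-- independent counting passes (objective: simpler).

-- shared small predicates (each corresponds to a literal Python test)
def pvIsPawn (name : String) : Bool := name == "white-pawn" || name == "black-pawn"
-- sq[1] in ('1', '8'); PySem.Str.pyGet? = none means the Python raises IndexError (excluded by Pre_)
def pvBadSq (sq : String) : Bool := PySem.Str.pyGet? sq 1 == some '1' || PySem.Str.pyGet? sq 1 == some '8'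

-- ===== PORT A =====
-- the loop over chess_pieces with the dict of six counters (wk, bk, wp, bp, w, b)
def pvGoA : List (String × String) → Int → Int → Int → Int → Int → Int → Bool
  | [], wk, bk, wp, bp, w, b =>
    if wk ≠ 1 ∨ bk ≠ 1 then false
    else if wp > 8 ∨ bp > 8 then false
    else if w > 16 ∨ b > 16 then false
    else true
  | (sq, name) :: rest, wk, bk, wp, bp, w, b =>
    if name == "white-king" then pvGoA rest (wk + 1) bk wp bp (w + 1) b
    else if name == "black-king" then pvGoA rest wk (bk + 1) wp bp w (b + 1)
    else if name == "white-pawn" then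
      if pvBadSq sq then false else pvGoA rest wk bk (wp + 1) bp (w + 1) b
    else if name == "black-pawn" then
      if pvBadSq sq then false else pvGoA rest wk bk wp (bp + 1) w (b + 1)
    else if PySem.Str.startswith name "white" then pvGoA rest wk bk wp bp (w + 1) b
    else if PySem.Str.startswith name "black" then pvGoA rest wk bk wp bp w (b + 1)
    else pvGoA rest wk bk wp bp w b

def validate_chess_position (chess_pieces : List (String × String)) : Bool :=
  pvGoA chess_pieces 0 0 0 0 0 0

-- ===== PORT B =====
def validate_chess_position_alt (chess_pieces : List (String × String)) : Bool :=
  if chess_pieces.any (fun p => pvIsPawn p.2 && pvBadSq p.1) then false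
  else
    let names := chess_pieces.map Prod.snd
    (PySem.List.count names "white-king" == 1) &&
    (PySem.List.count names "black-king" == 1) &&
    decide (PySem.List.count names "white-pawn" ≤ 8) &&
    decide (PySem.List.count names "black-pawn" ≤ 8) &&
    decide (names.countP (fun n => PySem.Str.startswith n "white") ≤ 16) &&
    decide (names.countP (fun n => PySem.Str.startswith n "black") ≤ 16)

-- ===== PRECONDITION & SPEC =====
-- Pre_ excludes exactly the inputs on which A raises IndexError: a pawn entry whose square
-- string has no index 1, reached before any pawn on rank '1'/'8' triggers the early return.
def Pre_validate_chess_position (chess_pieces : List (String × String)) : Prop :=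
  ∀ i, (h : i < chess_pieces.length) →
    pvIsPawn chess_pieces[i].2 = true → PySem.Str.pyGet? chess_pieces[i].1 1 = none →
    ∃ j, ∃ _ : j < i, pvIsPawn (chess_pieces[j]'(by omega)).2 = true ∧ pvBadSq (chess_pieces[j]'(by omega)).1 = true

instance (chess_pieces : List (String × String)) : Decidable (Pre_validate_chess_position chess_pieces) := by
  unfold Pre_validate_chess_position; infer_instance

def pvWitness_validate_chess_position : (List (String × String)) :=
  [("e1", "white-king"), ("e8", "black-king"), ("a2", "white-pawn")]

def Spec_validate_chess_position (chess_pieces : List (String × String)) (out : Bool) : Prop := out = validate_chess_position_alt chess_pieces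
instance (chess_pieces : List (String × String)) (out : Bool) : Decidable (Spec_validate_chess_position chess_pieces out) := by unfold Spec_validate_chess_position; infer_instance

-- ===== CLAIM (what is proved, stated in full; the proofs are below) =====
def Claim_equal_validate_chess_position : Prop := ∀ (chess_pieces : List (String × String)), Dom_validate_chess_position chess_pieces → Pre_validate_chess_position chess_pieces → Spec_validate_chess_position chess_pieces (validate_chess_position chess_pieces)

-- ===== LEMMAS AND PROOFS =====

-- a list of characters cannot start with both "white" and "black"
lemma pv_white_not_black (l : List Char) (h : PySem.Chars.startswith l ['w','h','i','t','e'] = true) :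
    PySem.Chars.startswith l ['b','l','a','c','k'] = false := by
  by_contra hb
  rw [Bool.not_eq_false, PySem.Chars.startswith_iff] at hb
  rw [PySem.Chars.startswith_iff] at h
  rcases h with ⟨t, rfl⟩
  rcases hb with ⟨u, he⟩
  simp at he

-- the final counter checks of A as a function of the six totals
def pvFinal (wk bk wp bp w b : Int) : Bool :=
  if wk ≠ 1 ∨ bk ≠ 1 then false
  else if wp > 8 ∨ bp > 8 then false
  else if w > 16 ∨ b > 16 then false
  else true

lemma pvGoA_eq (ps : List (String × String)) :
    ∀ wk bk wp bp w b : Int,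
    pvGoA ps wk bk wp bp w b =
      if ps.any (fun p => pvIsPawn p.2 && pvBadSq p.1) then false
      else
        pvFinal (wk + (PySem.List.count (ps.map Prod.snd) "white-king" : Int))
          (bk + (PySem.List.count (ps.map Prod.snd) "black-king" : Int))
          (wp + (PySem.List.count (ps.map Prod.snd) "white-pawn" : Int))
          (bp + (PySem.List.count (ps.map Prod.snd) "black-pawn" : Int))
          (w + ((ps.map Prod.snd).countP (fun n => PySem.Str.startswith n "white") : Int))
          (b + ((ps.map Prod.snd).countP (fun n => PySem.Str.startswith n "black") : Int)) := by
  induction ps with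
  | nil => intro wk bk wp bp w b; simp [pvGoA, pvFinal, PySem.List.count]
  | cons hd tl ih =>
    obtain ⟨sq, name⟩ := hd
    intro wk bk wp bp w b
    by_cases h1 : name = "white-king"
    · simp [pvGoA, h1, pvIsPawn, PySem.List.count, List.countP_cons, ih]
      try simp [PySem.Chars.startswith_iff]
      try simp [add_assoc, add_comm, add_left_comm]
    · by_cases h2 : name = "black-king"
      · simp [pvGoA, h1, h2, pvIsPawn, PySem.List.count, List.countP_cons, ih]
        try simp [PySem.Chars.startswith_iff]
        try simp [add_assoc, add_comm, add_left_comm]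
      · by_cases h3 : name = "white-pawn"
        · by_cases hbad : pvBadSq sq = true
          · simp [pvGoA, h1, h2, h3, pvIsPawn, hbad]
          · simp [pvGoA, h1, h2, h3, pvIsPawn, hbad, PySem.List.count, List.countP_cons, ih]
            try simp [PySem.Chars.startswith_iff]
            try simp [add_assoc, add_comm, add_left_comm]
        · by_cases h4 : name = "black-pawn"
          · by_cases hbad : pvBadSq sq = true
            · simp [pvGoA, h1, h2, h3, h4, pvIsPawn, hbad]
            · simp [pvGoA, h1, h2, h3, h4, pvIsPawn, hbad, PySem.List.count, List.countP_cons, ih]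
              try simp [PySem.Chars.startswith_iff]
              try simp [add_assoc, add_comm, add_left_comm]
          · have e3 : (name == "white-pawn") = false := by simp [h3]
            have e4 : (name == "black-pawn") = false := by simp [h4]
            simp [pvGoA, h1, h2, h3, h4, pvIsPawn, PySem.List.count, List.countP_cons, ih, e3, e4]
            by_cases hw : PySem.Str.startswith name "white" = true
            · simp at hw
              simp [hw, pv_white_not_black name.toList hw, add_assoc, add_comm, add_left_comm]
            · simp at hw
              by_cases hb : PySem.Str.startswith name "black" = true
              · simp at hb
                simp [hw, hb, add_assoc, add_comm, add_left_comm]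
              · simp at hb
                simp [hw, hb]

lemma pvFinal_eq_alt (cwk cbk cwp cbp cw cb : Nat) :
    pvFinal (0 + (cwk : Int)) (0 + (cbk : Int)) (0 + (cwp : Int)) (0 + (cbp : Int))
        (0 + (cw : Int)) (0 + (cb : Int)) =
      ((cwk == 1) && (cbk == 1) && decide (cwp ≤ 8) && decide (cbp ≤ 8) &&
        decide (cw ≤ 16) && decide (cb ≤ 16)) := by
  simp only [pvFinal, zero_add]
  split_ifs <;> simp_all <;> omega

-- ===== VERDICT (by name: the statement is the Claim_ definition above) =====
theorem validate_chess_position_spec : Claim_equal_validate_chess_position := by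
  intro ps _ _
  unfold Spec_validate_chess_position validate_chess_position validate_chess_position_alt
  rw [pvGoA_eq]
  split
  · rfl
  · exact pvFinal_eq_alt _ _ _ _ _ _
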